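-- pv_equiv track=rewrite | github.com/AlanLuna18011658/LexSynTuring | Analyzers/src/turing_machine.py | maquina_turing
-- ===== SOURCE A (Python) =====
-- def maquina_turing(data): # En esta funcion se recibe una cadena de entrada data, la cadena se convierte en una lista llamada cinta.
--     cinta = list(data) # Esta parte representa una cinta de una maquina de turing.
--
--     posicion = 0 # Variable para rastrear la posicion actual de la cabeza de la maquina de turing.
--     contador_0 = 0 # Cuenta todos los simbolos 0
--     contador_1 = 0 # Cuenta todos los simbolos 1
--     estado_actual = 'q0' # Guarda el simbolo actual de la maquina de turing.
--
--     while estado_actual != 'qf': # Aqui definimos la logica, el bucle while se ejecuta cuando el estado actual NO sea qf.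
--         simbolo = cinta[posicion] if posicion < len(cinta) else ' ' # Obtenemos el simbolo actual de la cinta en la posicion actual de la cabeza de la maquina de turing.
--         #  Si no es el caso, se considera un espacio en blanco en la cinta.
--
--         if estado_actual == 'q0' and simbolo == '0': # Estado actual q0 y simbolo 0, entonces:
--             cinta[posicion] = '1' # Reemplazamos el simbolo actual de la cinta por un 1.
--             posicion += 1 # Movemos la cabeza un cuadro a la derecha(right).
--             estado_actual = 'q0' # El estado actual se mantiene como q0.
--             contador_0 += 1 # Se incrementa el contador de 0 a 1.
--         elif estado_actual == 'q0' and simbolo == '1': # Estado actual q0 y simbolo 0, entonces: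
--             cinta[posicion] = '0' # Reemplazamos el simbolo actual de la cinta por un 0.
--             posicion += 1 # Movemos la cabeza un cuadro a la derecha(right).
--             estado_actual = 'q0' # El estado actual se mantiene como q0.
--             contador_1 += 1 # Se incrementa el contador de 1 en 1.
--         elif estado_actual == 'q0' and simbolo == ' ': # Si el estado actual es q0 y el simbolo es un estado vacio.
--             estado_actual = 'qf' # Se actualiza el estado actual a qf(estado final).
--         else:
--             break # Si no se cumplen las condiciones anteriores, el bucle se finaliza.
--
--     return estado_actual == 'qf' and contador_0 == contador_1 # El programa devuelve VERDAD si el estado actual es un estado final.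
-- ===== SOURCE B (Python) =====
-- def maquina_turing(data):
--     valid = all(c in ('0', '1') for c in data)
--     return valid and data.count('0') == data.count('1')
-- ===== Notes on version B (the rewrite author's own statement) =====
-- stated objective: simpler
-- what changed: Replaced the Turing-machine tape simulation (list copy, head position, in-place cell rewrites, state variable) by the direct predicate: every character is '0' or '1' and the two counts are equal.
-- intended difference: On strings whose maximal leading run of binary digits is balanced and is immediately followed by a space, A returns True because its scan halts at the space as if it were the blank end of the tape and ignores the rest, while B returns False; B's value is intended because such strings are not all-binary strings with equal counts. — e.g. on maquina_turing("01 x"): A returns true, B returns false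
import Mathlib
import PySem

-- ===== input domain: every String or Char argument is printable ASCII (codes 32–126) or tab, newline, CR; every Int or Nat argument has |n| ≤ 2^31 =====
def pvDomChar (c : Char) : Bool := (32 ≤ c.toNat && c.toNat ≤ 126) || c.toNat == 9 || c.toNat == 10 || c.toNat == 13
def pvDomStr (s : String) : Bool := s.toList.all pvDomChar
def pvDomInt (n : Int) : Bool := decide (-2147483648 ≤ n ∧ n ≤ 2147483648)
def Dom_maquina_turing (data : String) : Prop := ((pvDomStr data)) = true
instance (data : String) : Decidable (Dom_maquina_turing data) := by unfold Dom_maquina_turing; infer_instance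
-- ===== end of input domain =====

-- B replaces A's tape/state simulation by the direct predicate (all chars binary, counts equal);
-- on strings where a space follows a balanced binary prefix A returns True, B returns False (see D_).

-- ===== PORT A =====
-- the while loop of A: only state 'q0' can recur; cinta is mutated in place (cinta.set),
-- posicion moves right, contador_0/contador_1 are the Python int counters.
def pvLoopA (cinta : List Char) (posicion : Nat) (contador_0 contador_1 : Int) : Bool :=
  if h : posicion < cinta.length then
    -- simbolo = cinta[posicion]
    let simbolo := cinta[posicion]
    if simbolo = '0' then
      pvLoopA (cinta.set posicion '1') (posicion + 1) (contador_0 + 1) contador_1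
    else if simbolo = '1' then
      pvLoopA (cinta.set posicion '0') (posicion + 1) contador_0 (contador_1 + 1)
    else if simbolo = ' ' then
      -- estado_actual := 'qf'; loop exits; return (estado == 'qf' and contador_0 == contador_1)
      contador_0 == contador_1
    else
      -- break with estado_actual = 'q0'; the final return is then False
      false
  else
    -- posicion is past the tape: simbolo = ' ', so estado becomes 'qf' and the loop exits
    contador_0 == contador_1
termination_by cinta.length - posicion
decreasing_by all_goals simp [List.length_set]; omega

def maquina_turing (data : String) : Bool :=
  pvLoopA data.toList 0 0 0

-- ===== PORT B =====
def maquina_turing_alt (data : String) : Bool :=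
  -- valid = all(c in ('0', '1') for c in data)
  let valid := data.toList.all (fun c => c == '0' || c == '1')
  valid && (data.toList.count '0' == data.toList.count '1')

-- helper used only by D_ and the proofs: c is a binary digit
def pvBin (c : Char) : Bool := decide (c = '0' ∨ c = '1')

-- ===== PRECONDITION & SPEC =====
-- On strings whose maximal leading run of '0'/'1' characters is balanced and is immediately
-- followed by a space, A returns True (it halts at the space as at the blank end of the tape,
-- ignoring the rest), while B returns False; B's value is intended: such strings are not
-- all-binary strings with equal counts.
def D_maquina_turing (data : String) : Prop :=
  (data.toList.dropWhile pvBin).head? = some ' ' ∧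
  (data.toList.takeWhile pvBin).count '0' = (data.toList.takeWhile pvBin).count '1'
instance (data : String) : Decidable (D_maquina_turing data) := by
  unfold D_maquina_turing; infer_instance

def Spec_maquina_turing (data : String) (out : Bool) : Prop :=
  ¬ D_maquina_turing data → out = maquina_turing_alt data
instance (data : String) (out : Bool) : Decidable (Spec_maquina_turing data out) := by
  unfold Spec_maquina_turing; infer_instance

def pvDiffWitness_maquina_turing : String := "01 x"
def pvDiffWitnessOut_maquina_turing : Bool × Bool := (true, false)

-- ===== CLAIM (what is proved, stated in full; the proofs are below) =====
def Claim_unchanged_maquina_turing : Prop :=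
  ∀ (data : String), Dom_maquina_turing data → Spec_maquina_turing data (maquina_turing data)
def Claim_changed_maquina_turing : Prop :=
  Dom_maquina_turing (pvDiffWitness_maquina_turing) ∧
  D_maquina_turing (pvDiffWitness_maquina_turing) ∧
  maquina_turing (pvDiffWitness_maquina_turing) = pvDiffWitnessOut_maquina_turing.1 ∧
  maquina_turing_alt (pvDiffWitness_maquina_turing) = pvDiffWitnessOut_maquina_turing.2 ∧
  pvDiffWitnessOut_maquina_turing.1 ≠ pvDiffWitnessOut_maquina_turing.2
def Claim_exact_maquina_turing : Prop :=
  ∀ (data : String), Dom_maquina_turing data → D_maquina_turing data →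
    maquina_turing data ≠ maquina_turing_alt data

-- ===== LEMMAS AND PROOFS =====

lemma pvBin_lambda : (fun c : Char => c == '0' || c == '1') = pvBin := by
  funext c
  by_cases h0 : c = '0' <;> by_cases h1 : c = '1' <;> simp [pvBin, h0, h1]

-- functional description of A's loop on the unread suffix of the tape
def pvG (s : List Char) (c0 c1 : Int) : Bool :=
  match s with
  | [] => c0 == c1
  | c :: t =>
    if c = '0' then pvG t (c0 + 1) c1
    else if c = '1' then pvG t c0 (c1 + 1)
    else if c = ' ' then c0 == c1
    else false

lemma pvLoopA_eq_pvG (n : Nat) :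
    ∀ (cinta : List Char) (pos : Nat) (c0 c1 : Int), cinta.length - pos ≤ n →
      pvLoopA cinta pos c0 c1 = pvG (cinta.drop pos) c0 c1 := by
  induction n with
  | zero =>
    intro cinta pos c0 c1 h
    have hge : cinta.length ≤ pos := by omega
    rw [pvLoopA, List.drop_eq_nil_of_le hge]
    have hnp : ¬ pos < cinta.length := by omega
    simp [hnp, pvG]
  | succ n ih =>
    intro cinta pos c0 c1 h
    rw [pvLoopA]
    by_cases hp : pos < cinta.length
    · have hdrop : cinta.drop pos = cinta[pos] :: cinta.drop (pos + 1) :=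
        List.drop_eq_getElem_cons hp
      have hset : ∀ x : Char, (cinta.set pos x).drop (pos + 1) = cinta.drop (pos + 1) := by
        intro x
        apply List.ext_getElem
        · simp
        · intro i h1 h2
          simp [List.getElem_set]
          omega
      have hlen : ∀ x : Char, (cinta.set pos x).length - (pos + 1) ≤ n := by
        intro x; simp [List.length_set]; omega
      rw [dif_pos hp, hdrop, pvG]
      show (if cinta[pos] = '0' then _ else _) = _
      split_ifs with h0 h1' hsp
      · rw [ih _ _ _ _ (hlen '1'), hset]
      · rw [ih _ _ _ _ (hlen '0'), hset]
      · rfl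
      · rfl
    · have hdrop : cinta.drop pos = [] := List.drop_eq_nil_of_le (by omega)
      simp [hp, hdrop, pvG]

-- closed form of pvG in terms of the maximal binary prefix and what follows it
lemma pvG_closed : ∀ (s : List Char) (c0 c1 : Int),
    pvG s c0 c1 =
      (((s.dropWhile pvBin).head?.getD ' ' == ' ') &&
       (c0 + ((s.takeWhile pvBin).count '0' : Int) == c1 + ((s.takeWhile pvBin).count '1' : Int))) := by
  intro s
  induction s with
  | nil => intro c0 c1; simp [pvG]
  | cons c t ih =>
    intro c0 c1
    by_cases h0 : c = '0'
    · subst h0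
      rw [pvG]
      simp only []
      rw [ih]
      have hb : pvBin '0' = true := by decide
      have harith : c0 + 1 + ((t.takeWhile pvBin).count '0' : Int)
          = c0 + (((t.takeWhile pvBin).count '0' : Int) + 1) := by ring
      simp [hb, harith]
    · by_cases h1 : c = '1'
      · subst h1
        rw [pvG]
        simp only [if_neg (by decide : ¬ ('1' : Char) = '0')]
        rw [ih]
        have hb : pvBin '1' = true := by decide
        have harith : c1 + 1 + ((t.takeWhile pvBin).count '1' : Int)
            = c1 + (((t.takeWhile pvBin).count '1' : Int) + 1) := by ring
        simp [hb, harith]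
      · have hbin : pvBin c = false := by
          simp only [pvBin, decide_eq_false_iff_not]
          tauto
        rw [pvG]
        simp only [if_neg h0, if_neg h1]
        by_cases hsp : c = ' '
        · subst hsp
          simp [hbin]
        · simp [hbin, hsp]

lemma maquina_turing_closed (data : String) :
    maquina_turing data =
      ((((data.toList.dropWhile pvBin).head?.getD ' ') == ' ') &&
       ((data.toList.takeWhile pvBin).count '0' == (data.toList.takeWhile pvBin).count '1')) := by
  unfold maquina_turing
  rw [pvLoopA_eq_pvG (data.toList.length) _ _ _ _ (by omega), List.drop_zero, pvG_closed]
  congr 1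
  simp only [zero_add]
  by_cases h : (data.toList.takeWhile pvBin).count '0' = (data.toList.takeWhile pvBin).count '1'
  · simp [h]
  · have : ((data.toList.takeWhile pvBin).count '0' : Int) ≠ ((data.toList.takeWhile pvBin).count '1' : Int) := by
      exact_mod_cast h
    simp [h, this]

lemma all_bin_iff_dropWhile_nil (l : List Char) :
    l.all pvBin = true ↔ l.dropWhile pvBin = [] := by
  constructor
  · intro h
    apply List.dropWhile_eq_nil_iff.mpr
    intro x hx; exact List.all_eq_true.mp h x hx
  · intro h
    apply List.all_eq_true.mpr
    intro x hx
    by_contra hb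
    have := List.takeWhile_append_dropWhile (p := pvBin) (l := l)
    rw [h, List.append_nil] at this
    rw [← this] at hx
    have := List.mem_takeWhile_imp hx
    simp_all

theorem maquina_turing_spec : Claim_unchanged_maquina_turing := by
  intro data _ hD
  unfold D_maquina_turing at hD
  rw [maquina_turing_closed]
  unfold maquina_turing_alt
  rw [pvBin_lambda]
  set l := data.toList with hl
  by_cases hall : l.all pvBin = true
  · have hnil : l.dropWhile pvBin = [] := (all_bin_iff_dropWhile_nil l).mp hall
    have htake : l.takeWhile pvBin = l := by
      have := List.takeWhile_append_dropWhile (p := pvBin) (l := l)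
      rw [hnil, List.append_nil] at this; exact this
    simp [hnil, htake, hall]
  · have hne : l.dropWhile pvBin ≠ [] := fun h => hall ((all_bin_iff_dropWhile_nil l).mpr h)
    obtain ⟨c, t, hct⟩ := List.exists_cons_of_ne_nil hne
    by_cases hsp : c = ' '
    · -- head is a space; ¬D_ forces the prefix counts to differ, so both sides are false
      have hcnt : (l.takeWhile pvBin).count '0' ≠ (l.takeWhile pvBin).count '1' := by
        intro h; exact hD ⟨by rw [hct, hsp]; rfl, h⟩
      simp [hct, hsp, hcnt, hall]
    · simp [hct, hsp, hall]

theorem maquina_turing_changed : Claim_changed_maquina_turing := by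
  unfold Claim_changed_maquina_turing
  refine ⟨by decide, by decide, ?_, by decide, by decide⟩
  rw [maquina_turing_closed]
  decide

theorem maquina_turing_tight : Claim_exact_maquina_turing := by
  intro data _ hD
  obtain ⟨hhd, hcnt⟩ := hD
  rw [maquina_turing_closed]
  have hA : (((data.toList.dropWhile pvBin).head?.getD ' ') == ' ') = true := by
    rw [hhd]; rfl
  have hne : data.toList.dropWhile pvBin ≠ [] := by
    intro h; rw [h] at hhd; simp at hhd
  have hB : maquina_turing_alt data = false := by
    unfold maquina_turing_alt
    rw [pvBin_lambda]
    have : data.toList.all pvBin ≠ true := fun h =>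
      hne ((all_bin_iff_dropWhile_nil _).mp h)
    simp [this]
  rw [hB, hA]
  simp [hcnt]
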